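-- pv_equiv track=rewrite | github.com/javier25987/fondo_new_version | funciones/cuotas.py | pagar_n_cuotas_terorero
-- ===== SOURCE A (Python) =====
-- def pagar_n_cuotas_terorero(s_c: str, n: int, s_t: str, t: str) -> str:
--     cuotas_pagas: int = s_c.count("p")
--
--     if cuotas_pagas == 50:
--         return s_c
--
--     if 50 - cuotas_pagas < n:
--         return s_c
--
--     s_c: list[str] = list(s_c)
--     s_t: list[str] = list(s_t)
--     i: int = 0
--     while n > 0:
--         if s_c[i] != "p":
--             s_c[i] = "p"
--             s_t[i] = t
--             n -= 1
--         i += 1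
--
--     return "".join(s_c), "".join(s_t)
-- ===== SOURCE B (Python) =====
-- def pagar_n_cuotas_terorero(s_c: str, n: int, s_t: str, t: str) -> str:
--     pagas = s_c.count("p")
--     if pagas == 50:
--         return s_c
--     if 50 - pagas < n:
--         return s_c
--     if n <= 0:
--         return s_c, s_t
--     # Closed-form reconstruction: find k, the cutoff right after the n-th
--     # unpaid char; the whole prefix s_c[:k] becomes 'p', the rest is untouched.
--     seen = 0
--     k = 0
--     for c in s_c:
--         k += 1
--         if c != "p":
--             seen += 1
--             if seen == n:
--                 break
--     new_c = "p" * k + s_c[k:]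
--     new_t = "".join([t if c != "p" else u for c, u in zip(s_c[:k], s_t[:k])] + list(s_t[k:]))
--     return new_c, new_t
-- ===== Notes on version B (the rewrite author's own statement) =====
-- stated objective: alternative
-- what changed: Instead of A's in-place list mutation inside an index-chasing while-loop, B computes one cutoff index k (just past the n-th unpaid slot) and rebuilds both outputs by slicing: the paid string is 'p'*k + s_c[k:] (no per-slot writes) and the dates string is rebuilt from zip(s_c[:k], s_t[:k]) plus the untouched tail.
-- outside the precondition, e.g. on pagar_n_cuotas_terorero('x', 60, 'y', 't'): A returns 'x', B returns 'x'
import Mathlib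
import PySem

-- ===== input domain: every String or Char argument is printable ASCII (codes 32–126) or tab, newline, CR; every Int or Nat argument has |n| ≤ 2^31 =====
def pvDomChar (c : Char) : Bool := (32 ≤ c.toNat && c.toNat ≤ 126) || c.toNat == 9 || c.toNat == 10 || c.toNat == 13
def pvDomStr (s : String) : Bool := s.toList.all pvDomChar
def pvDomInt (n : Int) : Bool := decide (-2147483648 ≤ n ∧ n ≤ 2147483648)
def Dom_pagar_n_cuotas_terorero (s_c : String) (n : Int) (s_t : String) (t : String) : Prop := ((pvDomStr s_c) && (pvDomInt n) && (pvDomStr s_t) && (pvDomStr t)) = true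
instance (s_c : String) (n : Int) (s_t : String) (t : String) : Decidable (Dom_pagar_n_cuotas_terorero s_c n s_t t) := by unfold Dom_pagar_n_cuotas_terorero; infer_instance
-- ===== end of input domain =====

-- B replaces A's in-place mutation loop by a closed-form reconstruction from one cutoff index
-- (prefix 'p'*k + untouched tail); equivalence is about the RETURN value on Pre_.

-- ===== PORT A =====
-- the while-loop of A: state (n, i, lc, lt); fuel bounds the iteration count (the loop either
-- stops with n ≤ 0 or hits an IndexError — 'none' from pyGet?/pySet? — which Pre_ excludes)
def pagarALoop (t : String) : Nat → Int → Int → List Char → List String → List Char × List String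
  | 0, _, _, lc, lt => (lc, lt)
  | fuel+1, n, i, lc, lt =>
    if n > 0 then
      match PySem.List.pyGet? lc i with
      | none => (lc, lt)                     -- IndexError in Python: outside Pre_
      | some c =>
        if c ≠ 'p' then
          match PySem.List.pySet? lt i t with
          | none => (PySem.List.pySetD lc i 'p', lt)   -- IndexError on s_t[i]=t: outside Pre_
          | some lt' => pagarALoop t fuel (n-1) (i+1) (PySem.List.pySetD lc i 'p') lt'
        else pagarALoop t fuel n (i+1) lc lt
    else (lc, lt)

def pagar_n_cuotas_terorero (s_c : String) (n : Int) (s_t : String) (t : String) : String × String :=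
  let cuotas_pagas : Int := PySem.Str.count s_c "p"
  if cuotas_pagas = 50 then (s_c, s_t)       -- Python returns the bare string s_c here: outside Pre_
  else if 50 - cuotas_pagas < n then (s_c, s_t)   -- bare string again: outside Pre_
  else
    let lc := s_c.toList
    let lt := s_t.toList.map (fun c => String.ofList [c])
    let r := pagarALoop t (lc.length + 1) n 0 lc lt
    (String.ofList r.1, PySem.Str.join "" r.2)

-- ===== PORT B =====
-- the 'for c in s_c' scan that finds the cutoff k (index just past the n-th non-'p' char;
-- len(s_c) if the loop falls through, which Pre_ excludes for the main path)
def pagarFindK : List Char → Int → Nat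
  | [], _ => 0
  | c :: cs, n => if c ≠ 'p' then (if n = 1 then 1 else pagarFindK cs (n-1) + 1) else pagarFindK cs n + 1

def pagar_n_cuotas_terorero_alt (s_c : String) (n : Int) (s_t : String) (t : String) : String × String :=
  let pagas : Int := PySem.Str.count s_c "p"
  if pagas = 50 then (s_c, s_t)              -- Python returns the bare string s_c here: outside Pre_
  else if 50 - pagas < n then (s_c, s_t)     -- bare string again: outside Pre_
  else if n ≤ 0 then (s_c, s_t)
  else
    let k := pagarFindK s_c.toList n
    -- "p" * k + s_c[k:]  (string concatenation done on the char-list side, exact)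
    let new_c := List.replicate k 'p' ++ PySem.List.slice s_c.toList (some (k : Int)) none
    -- "".join([t if c != "p" else u for c, u in zip(s_c[:k], s_t[:k])] + list(s_t[k:]))
    let new_t := PySem.Str.join ""
      (((PySem.List.slice s_c.toList none (some (k : Int))).zip
          ((PySem.List.slice s_t.toList none (some (k : Int))).map (fun c => String.ofList [c]))).map
        (fun p => if p.1 ≠ 'p' then t else p.2)
       ++ (PySem.List.slice s_t.toList (some (k : Int)) none).map (fun c => String.ofList [c]))
    (String.ofList new_c, new_t)

-- ===== PRECONDITION & SPEC =====
-- Pre_ excludes (a) the two guard branches, where A returns a bare str instead of the declared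
-- (str, str) tuple, and (b) n > 0 with fewer than n non-'p' slots indexable in both strings,
-- where A's while-loop raises IndexError.
def Pre_pagar_n_cuotas_terorero (s_c : String) (n : Int) (s_t : String) (t : String) : Prop :=
  (PySem.Str.count s_c "p" : Int) ≠ 50 ∧ n ≤ 50 - (PySem.Str.count s_c "p" : Int) ∧
  (n ≤ 0 ∨ n ≤ ((s_c.toList.take s_t.toList.length).countP (fun c => c != 'p') : Int))
instance (s_c : String) (n : Int) (s_t : String) (t : String) : Decidable (Pre_pagar_n_cuotas_terorero s_c n s_t t) := by unfold Pre_pagar_n_cuotas_terorero; infer_instance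

def pvWitness_pagar_n_cuotas_terorero : String × Int × String × String := ("xpx", 2, "ab?", "T")

def Spec_pagar_n_cuotas_terorero (s_c : String) (n : Int) (s_t : String) (t : String) (out : String × String) : Prop := out = pagar_n_cuotas_terorero_alt s_c n s_t t
instance (s_c : String) (n : Int) (s_t : String) (t : String) (out : String × String) : Decidable (Spec_pagar_n_cuotas_terorero s_c n s_t t out) := by unfold Spec_pagar_n_cuotas_terorero; infer_instance

-- ===== CLAIM (what is proved, stated in full; the proofs are below) =====
def Claim_equal_pagar_n_cuotas_terorero : Prop := ∀ (s_c : String) (n : Int) (s_t : String) (t : String), Dom_pagar_n_cuotas_terorero s_c n s_t t → Pre_pagar_n_cuotas_terorero s_c n s_t t → Spec_pagar_n_cuotas_terorero s_c n s_t t (pagar_n_cuotas_terorero s_c n s_t t)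

-- ===== LEMMAS AND PROOFS =====

-- abstract description of A's loop on the remaining suffix
def pagarGo (t : String) : List Char → List String → Int → List Char × List String
  | [], us, _ => ([], us)
  | cs, [], _ => (cs, [])
  | c :: cs, u :: us, n =>
    if n ≤ 0 then (c :: cs, u :: us)
    else if c = 'p' then
      let p := pagarGo t cs us n
      (c :: p.1, u :: p.2)
    else
      let p := pagarGo t cs us (n - 1)
      ('p' :: p.1, t :: p.2)

theorem pagarGo_of_nonpos (t : String) (cs : List Char) (us : List String) (n : Int)
    (h : n ≤ 0) : pagarGo t cs us n = (cs, us) := by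
  cases cs with
  | nil => rfl
  | cons c cs => cases us with
    | nil => rfl
    | cons u us => simp [pagarGo, h]

theorem pagarALoop_eq_go (t : String) : ∀ (cs : List Char) (us : List String)
    (pc : List Char) (pu : List String) (n : Int) (fuel : Nat),
    pu.length = pc.length → cs.length < fuel →
    n ≤ ((cs.take us.length).countP (fun c => c != 'p') : Int) →
    pagarALoop t fuel n (pc.length : Int) (pc ++ cs) (pu ++ us)
      = (pc ++ (pagarGo t cs us n).1, pu ++ (pagarGo t cs us n).2) := by
  intro cs
  induction cs with
  | nil =>
    intro us pc pu n fuel hlen hfuel hcnt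
    simp at hcnt
    obtain ⟨f, rfl⟩ : ∃ f, fuel = f + 1 := ⟨fuel - 1, by omega⟩
    simp [pagarALoop, show ¬ n > 0 by omega, pagarGo_of_nonpos t _ _ _ hcnt]
  | cons c cs ih =>
    intro us pc pu n fuel hlen hfuel hcnt
    obtain ⟨f, rfl⟩ : ∃ f, fuel = f + 1 := ⟨fuel - 1, by omega⟩
    by_cases hn : n ≤ 0
    · simp [pagarALoop, show ¬ n > 0 by omega, pagarGo_of_nonpos t _ _ _ hn]
    · cases us with
      | nil => simp at hcnt; omega
      | cons u us =>
        have hget : PySem.List.pyGet? (pc ++ c :: cs) (pc.length : Int) = some c := by simp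
        by_cases hc : c = 'p'
        · subst hc
          have : pagarALoop t (f+1) n (pc.length : Int) (pc ++ 'p' :: cs) (pu ++ u :: us)
              = pagarALoop t f n ((pc.length : Int) + 1) (pc ++ 'p' :: cs) (pu ++ u :: us) := by
            simp [pagarALoop, show n > 0 by omega, hget]
          rw [this, show (pc ++ 'p' :: cs) = (pc ++ ['p']) ++ cs by simp,
              show (pu ++ u :: us) = (pu ++ [u]) ++ us by simp,
              show ((pc.length : Int) + 1) = (((pc ++ ['p']).length : Nat) : Int) by simp,
              ih us (pc ++ ['p']) (pu ++ [u]) n f (by simp [hlen]) (by simpa using hfuel)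
                (by simpa using hcnt)]
          simp [pagarGo, show ¬ n ≤ 0 by omega]
        · have hset : PySem.List.pySet? (pu ++ u :: us) (pc.length : Int) t
              = some (pu ++ t :: us) := by
            rw [show ((pc.length : Nat) : Int) = ((pu.length : Nat) : Int) by simp [hlen]]
            rw [PySem.List.pySet?_natCast _ _ _ (by simp)]
            simp [List.set_append]
          have : pagarALoop t (f+1) n (pc.length : Int) (pc ++ c :: cs) (pu ++ u :: us)
              = pagarALoop t f (n-1) ((pc.length : Int) + 1) (pc ++ 'p' :: cs) (pu ++ t :: us) := by
            simp [pagarALoop, show n > 0 by omega, hget, hc, hset]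
          rw [this, show (pc ++ 'p' :: cs) = (pc ++ ['p']) ++ cs by simp,
              show (pu ++ t :: us) = (pu ++ [t]) ++ us by simp,
              show ((pc.length : Int) + 1) = (((pc ++ ['p']).length : Nat) : Int) by simp,
              ih us (pc ++ ['p']) (pu ++ [t]) (n-1) f (by simp [hlen]) (by simpa using hfuel)
                (by simp [hc] at hcnt ⊢; omega)]
          simp [pagarGo, show ¬ n ≤ 0 by omega, hc]

-- closed form of the loop's result: with k = pagarFindK cs n, the first component is
-- 'p'^k ++ (cs after k) and the second is rebuilt from the zipped prefix plus the tail.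
theorem pagarGo_closed (t : String) : ∀ (cs : List Char) (us : List String) (n : Int),
    1 ≤ n → n ≤ ((cs.take us.length).countP (fun c => c != 'p') : Int) →
    pagarGo t cs us n
      = (List.replicate (pagarFindK cs n) 'p' ++ cs.drop (pagarFindK cs n),
         ((cs.take (pagarFindK cs n)).zip (us.take (pagarFindK cs n))).map
            (fun p => if p.1 ≠ 'p' then t else p.2)
           ++ us.drop (pagarFindK cs n)) := by
  intro cs
  induction cs with
  | nil =>
    intro us n hn hcnt
    simp at hcnt; omega
  | cons c cs ih =>
    intro us n hn hcnt
    cases us with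
    | nil => simp at hcnt; omega
    | cons u us =>
      by_cases hc : c = 'p'
      · subst hc
        have hcnt' : n ≤ ((cs.take us.length).countP (fun c => c != 'p') : Int) := by
          simpa using hcnt
        simp [pagarGo, pagarFindK, show ¬ n ≤ 0 by omega, ih us n hn hcnt', List.replicate_succ]
      · by_cases h1 : n = 1
        · subst h1
          simp [pagarGo, pagarFindK, hc, pagarGo_of_nonpos t cs us 0 le_rfl]
        · have hcnt' : n - 1 ≤ ((cs.take us.length).countP (fun c => c != 'p') : Int) := by
            simp [hc] at hcnt; omega
          simp [pagarGo, pagarFindK, hc, h1, show ¬ n ≤ 0 by omega,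
            ih us (n-1) (by omega) hcnt', List.replicate_succ]

-- ===== VERDICT (by name: the statement is the Claim_ definition above) =====
theorem pagar_n_cuotas_terorero_spec : Claim_equal_pagar_n_cuotas_terorero := by
  intro s_c n s_t t _ hpre
  obtain ⟨h50, hle, hcnt⟩ := hpre
  have hng : ¬ (50 - (PySem.Str.count s_c "p" : Int) < n) := by omega
  simp only [Spec_pagar_n_cuotas_terorero, pagar_n_cuotas_terorero, pagar_n_cuotas_terorero_alt]
  rw [if_neg h50, if_neg hng, if_neg h50, if_neg hng]
  by_cases hn : n ≤ 0
  · rw [if_pos hn]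
    have hstop : pagarALoop t (s_c.toList.length + 1) n 0 s_c.toList
        (s_t.toList.map (fun c => String.ofList [c]))
        = (s_c.toList, s_t.toList.map (fun c => String.ofList [c])) := by
      simp [pagarALoop, show ¬ n > 0 by omega]
    rw [hstop]
    simp [PySem.Str.join, Function.comp_def]
  · rw [if_neg hn]
    have hcnt' : n ≤ ((s_c.toList.take s_t.toList.length).countP (fun c => c != 'p') : Int) := by
      rcases hcnt with h | h
      · omega
      · exact h
    have hA := pagarALoop_eq_go t s_c.toList (s_t.toList.map (fun c => String.ofList [c]))
      [] [] n (s_c.toList.length + 1) rfl (by omega) (by simpa using hcnt')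
    simp only [List.length_nil, Nat.cast_zero, List.nil_append] at hA
    rw [hA, pagarGo_closed t s_c.toList (s_t.toList.map (fun c => String.ofList [c])) n
      (by omega) (by simpa using hcnt')]
    rw [PySem.List.slice_from_natCast, PySem.List.slice_to_natCast, PySem.List.slice_to_natCast,
        PySem.List.slice_from_natCast]
    simp [List.map_take, List.map_drop]
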